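-- pv_equiv track=rewrite | github.com/kareemelsenosy/flender-platform | app/core/searcher.py | _strict_hit_priority_pool
-- ===== SOURCE A (Python) =====
-- from typing import Any
--
-- def _strict_hit_priority_pool(hit: dict[str, Any]) -> int:
--     source_names = set(hit.get("source_names") or set())
--     if {"google_exact", "google_phrase", "google_scrape_exact", "google_scrape_phrase"} & source_names:
--         return 0
--     if {"bing_exact", "bing_phrase"} & source_names:
--         return 1
--     if any(
--         (name.startswith("brand_site") or name.startswith("extra_")) and ("exact" in name or "phrase" in name)
--         for name in source_names
--     ):
--         return 2
--     if {"google", "google_scrape"} & source_names: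
--         return 3
--     if {"bing", "ddg", "yahoo"} & source_names:
--         return 4
--     return 5
-- ===== SOURCE B (Python) =====
-- from typing import Any
--
--
-- def _name_priority(name: str) -> int:
--     if name in ("google_exact", "google_phrase", "google_scrape_exact", "google_scrape_phrase"):
--         return 0
--     if name in ("bing_exact", "bing_phrase"):
--         return 1
--     if (name.startswith("brand_site") or name.startswith("extra_")) and ("exact" in name or "phrase" in name):
--         return 2
--     if name in ("google", "google_scrape"):
--         return 3
--     if name in ("bing", "ddg", "yahoo"):
--         return 4
--     return 5
--
--
-- def _strict_hit_priority_pool(hit: dict[str, Any]) -> int: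
--     names = hit.get("source_names") or []
--     return min((_name_priority(n) for n in names), default=5)
-- ===== Notes on version B (the rewrite author's own statement) =====
-- stated objective: simpler
-- what changed: Replaces the ordered per-bucket set intersections over the whole name set by a single per-name classifier _name_priority (same branch order), reduced with min(..., default=5) over the names.
import Mathlib
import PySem

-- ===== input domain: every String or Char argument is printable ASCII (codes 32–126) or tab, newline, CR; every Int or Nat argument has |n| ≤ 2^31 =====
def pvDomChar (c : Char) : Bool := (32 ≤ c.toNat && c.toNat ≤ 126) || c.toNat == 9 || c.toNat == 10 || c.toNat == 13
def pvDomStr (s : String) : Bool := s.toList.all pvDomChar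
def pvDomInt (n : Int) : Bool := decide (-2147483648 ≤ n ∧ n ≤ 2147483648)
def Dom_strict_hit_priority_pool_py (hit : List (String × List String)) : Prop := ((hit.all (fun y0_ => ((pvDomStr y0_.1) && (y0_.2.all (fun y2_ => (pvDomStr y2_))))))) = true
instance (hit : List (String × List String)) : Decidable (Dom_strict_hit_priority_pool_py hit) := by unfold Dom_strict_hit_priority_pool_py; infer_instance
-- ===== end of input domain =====

-- B replaces A's ordered per-bucket set intersections by a per-name classifier reduced with min (same result; simpler decomposition).


-- ===== PORT A =====
-- 'hit.get("source_names") or set()': a missing key and an empty list both give the empty set, so set(getD hit "source_names" []) is exact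
def strict_hit_priority_pool_py (hit : List (String × List String)) : Int :=
  let source_names : PySem.Set String :=
    PySem.Set.ofList (PySem.Dict.getD (PySem.Dict.mk hit) "source_names" [])
  if PySem.Set.inter (PySem.Set.ofList ["google_exact", "google_phrase", "google_scrape_exact", "google_scrape_phrase"]) source_names ≠ [] then 0
  else if PySem.Set.inter (PySem.Set.ofList ["bing_exact", "bing_phrase"]) source_names ≠ [] then 1
  else if source_names.any (fun name =>
      (PySem.Str.startswith name "brand_site" || PySem.Str.startswith name "extra_")
      && (PySem.Str.isIn "exact" name || PySem.Str.isIn "phrase" name)) then 2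
  else if PySem.Set.inter (PySem.Set.ofList ["google", "google_scrape"]) source_names ≠ [] then 3
  else if PySem.Set.inter (PySem.Set.ofList ["bing", "ddg", "yahoo"]) source_names ≠ [] then 4
  else 5

-- ===== PORT B =====
def namePriority (name : String) : Int :=
  if ["google_exact", "google_phrase", "google_scrape_exact", "google_scrape_phrase"].contains name then 0
  else if ["bing_exact", "bing_phrase"].contains name then 1
  else if (PySem.Str.startswith name "brand_site" || PySem.Str.startswith name "extra_")
      && (PySem.Str.isIn "exact" name || PySem.Str.isIn "phrase" name) then 2
  else if ["google", "google_scrape"].contains name then 3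
  else if ["bing", "ddg", "yahoo"].contains name then 4
  else 5

def strict_hit_priority_pool_py_alt (hit : List (String × List String)) : Int :=
  let names := PySem.Dict.getD (PySem.Dict.mk hit) "source_names" []
  (names.map namePriority).foldl min 5

-- ===== PRECONDITION & SPEC =====
def Spec_strict_hit_priority_pool_py (hit : List (String × List String)) (out : Int) : Prop := out = strict_hit_priority_pool_py_alt hit
instance (hit : List (String × List String)) (out : Int) : Decidable (Spec_strict_hit_priority_pool_py hit out) := by unfold Spec_strict_hit_priority_pool_py; infer_instance

-- ===== CLAIM (what is proved, stated in full; the proofs are below) =====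
def Claim_equal_strict_hit_priority_pool_py : Prop := ∀ (hit : List (String × List String)), Dom_strict_hit_priority_pool_py hit → Spec_strict_hit_priority_pool_py hit (strict_hit_priority_pool_py hit)

-- ===== LEMMAS AND PROOFS =====

theorem foldl_min_le_init (l : List Int) (a : Int) : l.foldl min a ≤ a := by
  induction l generalizing a with
  | nil => simp
  | cons x t ih => exact le_trans (ih (min a x)) (min_le_left a x)

theorem foldl_min_le_of_mem {l : List Int} {x : Int} (h : x ∈ l) (a : Int) :
    l.foldl min a ≤ x := by
  induction l generalizing a with
  | nil => simp at h
  | cons y t ih =>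
    rcases List.mem_cons.mp h with h | h
    · subst h
      exact le_trans (foldl_min_le_init t (min a x)) (min_le_right a x)
    · exact ih h (min a y)

theorem le_foldl_min {l : List Int} {c a : Int} (h1 : c ≤ a) (h2 : ∀ x ∈ l, c ≤ x) :
    c ≤ l.foldl min a := by
  induction l generalizing a with
  | nil => simpa using h1
  | cons y t ih =>
    exact ih (le_min h1 (h2 y (List.mem_cons_self))) (fun x hx => h2 x (List.mem_cons_of_mem _ hx))

theorem namePriority_nonneg (n : String) : 0 ≤ namePriority n := by
  unfold namePriority; split_ifs <;> omega

-- per-name Bool tests, matching A's bucket order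
def q0 (n : String) : Bool := ["google_exact", "google_phrase", "google_scrape_exact", "google_scrape_phrase"].contains n
def q1 (n : String) : Bool := ["bing_exact", "bing_phrase"].contains n
def q2 (n : String) : Bool :=
  (PySem.Str.startswith n "brand_site" || PySem.Str.startswith n "extra_")
  && (PySem.Str.isIn "exact" n || PySem.Str.isIn "phrase" n)
def q3 (n : String) : Bool := ["google", "google_scrape"].contains n
def q4 (n : String) : Bool := ["bing", "ddg", "yahoo"].contains n

theorem namePriority_eq (n : String) :
    namePriority n = if q0 n then 0 else if q1 n then 1 else if q2 n then 2
      else if q3 n then 3 else if q4 n then 4 else 5 := rfl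

-- the cascade over l.any equals min over per-name priorities
theorem cascade_eq_min (l : List String) :
    (if l.any q0 then (0 : Int) else if l.any q1 then 1 else if l.any q2 then 2
      else if l.any q3 then 3 else if l.any q4 then 4 else 5)
    = (l.map namePriority).foldl min 5 := by
  by_cases h0 : l.any q0 = true
  · obtain ⟨x, hx, hq⟩ := List.any_eq_true.mp h0
    simp only [h0, if_true]
    refine le_antisymm ?_ ?_
    · apply le_foldl_min (by norm_num)
      intro v hv
      obtain ⟨y, _, rfl⟩ := List.mem_map.mp hv
      exact namePriority_nonneg y
    · have : namePriority x = 0 := by rw [namePriority_eq, hq]; simp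
      calc (l.map namePriority).foldl min 5 ≤ namePriority x :=
            foldl_min_le_of_mem (List.mem_map_of_mem hx) 5
        _ = 0 := this
  · have h0' : ∀ x ∈ l, q0 x = false := by
      intro x hx; by_contra h
      exact h0 (List.any_eq_true.mpr ⟨x, hx, by simpa using h⟩)
    by_cases h1 : l.any q1 = true
    · obtain ⟨x, hx, hq⟩ := List.any_eq_true.mp h1
      simp only [h0, h1, if_true]
      refine le_antisymm ?_ ?_
      · apply le_foldl_min (by norm_num)
        intro v hv
        obtain ⟨y, hy, rfl⟩ := List.mem_map.mp hv
        rw [namePriority_eq, h0' y hy]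
        split_ifs <;> omega
      · have : namePriority x = 1 := by rw [namePriority_eq, h0' x hx, hq]; simp
        calc (l.map namePriority).foldl min 5 ≤ namePriority x :=
              foldl_min_le_of_mem (List.mem_map_of_mem hx) 5
          _ = 1 := this
    · have h1' : ∀ x ∈ l, q1 x = false := by
        intro x hx; by_contra h
        exact h1 (List.any_eq_true.mpr ⟨x, hx, by simpa using h⟩)
      by_cases h2 : l.any q2 = true
      · obtain ⟨x, hx, hq⟩ := List.any_eq_true.mp h2
        simp only [h0, h1, h2, if_true]
        refine le_antisymm ?_ ?_
        · apply le_foldl_min (by norm_num)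
          intro v hv
          obtain ⟨y, hy, rfl⟩ := List.mem_map.mp hv
          rw [namePriority_eq, h0' y hy, h1' y hy]
          split_ifs <;> omega
        · have : namePriority x = 2 := by
            rw [namePriority_eq, h0' x hx, h1' x hx, hq]; simp
          calc (l.map namePriority).foldl min 5 ≤ namePriority x :=
                foldl_min_le_of_mem (List.mem_map_of_mem hx) 5
            _ = 2 := this
      · have h2' : ∀ x ∈ l, q2 x = false := by
          intro x hx; by_contra h
          exact h2 (List.any_eq_true.mpr ⟨x, hx, by simpa using h⟩)
        by_cases h3 : l.any q3 = true
        · obtain ⟨x, hx, hq⟩ := List.any_eq_true.mp h3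
          simp only [h0, h1, h2, h3, if_true]
          refine le_antisymm ?_ ?_
          · apply le_foldl_min (by norm_num)
            intro v hv
            obtain ⟨y, hy, rfl⟩ := List.mem_map.mp hv
            rw [namePriority_eq, h0' y hy, h1' y hy, h2' y hy]
            split_ifs <;> omega
          · have : namePriority x = 3 := by
              rw [namePriority_eq, h0' x hx, h1' x hx, h2' x hx, hq]; simp
            calc (l.map namePriority).foldl min 5 ≤ namePriority x :=
                  foldl_min_le_of_mem (List.mem_map_of_mem hx) 5
              _ = 3 := this
        · have h3' : ∀ x ∈ l, q3 x = false := by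
            intro x hx; by_contra h
            exact h3 (List.any_eq_true.mpr ⟨x, hx, by simpa using h⟩)
          by_cases h4 : l.any q4 = true
          · obtain ⟨x, hx, hq⟩ := List.any_eq_true.mp h4
            simp only [h0, h1, h2, h3, h4, if_true]
            refine le_antisymm ?_ ?_
            · apply le_foldl_min (by norm_num)
              intro v hv
              obtain ⟨y, hy, rfl⟩ := List.mem_map.mp hv
              rw [namePriority_eq, h0' y hy, h1' y hy, h2' y hy, h3' y hy]
              split_ifs <;> omega
            · have : namePriority x = 4 := by
                rw [namePriority_eq, h0' x hx, h1' x hx, h2' x hx, h3' x hx, hq]; simp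
              calc (l.map namePriority).foldl min 5 ≤ namePriority x :=
                    foldl_min_le_of_mem (List.mem_map_of_mem hx) 5
                _ = 4 := this
          · have h4' : ∀ x ∈ l, q4 x = false := by
              intro x hx; by_contra h
              exact h4 (List.any_eq_true.mpr ⟨x, hx, by simpa using h⟩)
            simp only [h0, h1, h2, h3, h4]
            refine le_antisymm ?_ (foldl_min_le_init _ _)
            apply le_foldl_min le_rfl
            intro v hv
            obtain ⟨y, hy, rfl⟩ := List.mem_map.mp hv
            rw [namePriority_eq, h0' y hy, h1' y hy, h2' y hy, h3' y hy, h4' y hy]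

-- A's intersection-nonempty test, read as an any over the raw name list
theorem inter_ne_nil_iff (L l : List String) :
    PySem.Set.inter (PySem.Set.ofList L) (PySem.Set.ofList l) ≠ [] ↔
      l.any (fun n => L.contains n) = true := by
  rw [← List.isEmpty_eq_false_iff, List.isEmpty_eq_false_iff_exists_mem]
  simp only [PySem.Set.mem_inter, PySem.Set.mem_ofList, List.any_eq_true,
    List.contains_iff_mem]
  constructor
  · rintro ⟨x, hL, hl⟩; exact ⟨x, hl, hL⟩
  · rintro ⟨x, hl, hL⟩; exact ⟨x, hL, hl⟩

-- any over set(l) equals any over l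
theorem any_ofList (l : List String) (p : String → Bool) :
    (PySem.Set.ofList l).any p = l.any p := by
  rw [Bool.eq_iff_iff]
  simp only [List.any_eq_true, PySem.Set.mem_ofList]

-- ===== VERDICT (by name: the statement is the Claim_ definition above) =====
theorem strict_hit_priority_pool_py_spec : Claim_equal_strict_hit_priority_pool_py := by
  intro hit _
  unfold Spec_strict_hit_priority_pool_py strict_hit_priority_pool_py strict_hit_priority_pool_py_alt
  set l := PySem.Dict.getD (PySem.Dict.mk hit) "source_names" [] with hl
  simp only [inter_ne_nil_iff, any_ofList]
  have h := cascade_eq_min l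
  unfold q0 q1 q2 q3 q4 at h
  simpa using h
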